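-- pv_equiv track=rewrite | github.com/binares/uxs | uxs/base/auth.py | _interpret_auth_id
-- ===== SOURCE A (Python) =====
-- ALL_DESCRIPTORS = ['test','null','info','trade','withdraw','info-','trade-','withdraw-']
--
-- def _interpret_auth_id(id):
--     if id is None: id = ''
--     specs = id.lower().split('_')
--     by_rank = ['info','trade','withdraw']
--
--     d = {}
--
--     d['active'] = not any(x in specs for x in ('disabled','inactive'))
--     d['test'] = 'test' in specs
--
--     rights = dict.fromkeys(by_rank, False)
--
--     for rank in filter(lambda x: x in specs, ALL_DESCRIPTORS[2:]):
--         include_lower_ranks = True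
--
--         if rank.endswith('-'):
--             rank = rank[:-1]
--             include_lower_ranks = False
--
--         if include_lower_ranks:
--             index = by_rank.index(rank)
--             changed = dict.fromkeys(by_rank[:index+1], True)
--         else:
--             changed = {rank: True}
--
--         rights.update(changed)
--
--     return dict(d, **rights)
-- ===== SOURCE B (Python) =====
-- def _interpret_auth_id(id):
--     specs = (id if id is not None else '').lower().split('_')
--     by_rank = ['info', 'trade', 'withdraw']
--     max_idx = max((i for i, r in enumerate(by_rank) if r in specs), default=-1)
--     return {
--         'active': not ('disabled' in specs or 'inactive' in specs),
--         'test': 'test' in specs,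
--         **{r: i <= max_idx or r + '-' in specs for i, r in enumerate(by_rank)},
--     }
-- ===== Notes on version B (the rewrite author's own statement) =====
-- stated objective: simpler
-- what changed: Replaces A's filter-over-descriptors loop with dict updates by a direct computation: the largest granted rank index (default -1) gives the cumulative rights, and dash forms add their own rank, all in one comprehension.
import Mathlib
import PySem

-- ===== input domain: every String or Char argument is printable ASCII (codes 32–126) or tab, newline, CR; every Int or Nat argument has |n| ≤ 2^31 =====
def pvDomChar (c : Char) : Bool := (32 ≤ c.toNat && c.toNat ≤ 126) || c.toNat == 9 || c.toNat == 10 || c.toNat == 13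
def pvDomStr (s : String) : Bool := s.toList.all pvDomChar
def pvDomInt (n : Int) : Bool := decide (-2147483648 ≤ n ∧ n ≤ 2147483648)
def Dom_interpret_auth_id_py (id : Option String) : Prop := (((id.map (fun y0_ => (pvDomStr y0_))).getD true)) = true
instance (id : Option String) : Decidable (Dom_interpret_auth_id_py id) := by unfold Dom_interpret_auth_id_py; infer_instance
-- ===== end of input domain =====

-- B replaces A's descriptor-filter loop of dict updates by a direct computation (largest
-- granted rank index, default -1, plus the dash forms) for simplicity; return values only.

-- ===== PORT A =====
def interpret_auth_id_py (id : Option String) : List (String × Bool) :=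
  -- if id is None: id = ''
  let s : String := match id with | none => "" | some x => x
  -- specs = id.lower().split('_')   ('_' ≠ "", so split? never returns none)
  let specs : List String := (PySem.Str.split? (PySem.Str.lower s) "_").getD []
  let by_rank := ["info", "trade", "withdraw"]
  -- d['active'], d['test']
  let d : PySem.Dict String Bool :=
    ((PySem.Dict.empty).insert "active"
        (!(["disabled", "inactive"].any (fun x => specs.contains x)))).insert "test"
      (specs.contains "test")
  -- rights = dict.fromkeys(by_rank, False)
  let rights : PySem.Dict String Bool :=
    by_rank.foldl (fun acc k => acc.insert k false) PySem.Dict.empty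
  -- for rank in filter(lambda x: x in specs, ALL_DESCRIPTORS[2:]): ...
  let rights :=
    (((["info", "trade", "withdraw", "info-", "trade-", "withdraw-"]).filter
        (fun x => specs.contains x)).foldl
      (fun rs rank =>
        let include_lower_ranks := ¬ PySem.Str.endswith rank "-"
        let rank := if include_lower_ranks then rank else PySem.Str.slice rank none (some (-1))
        let changed : PySem.Dict String Bool :=
          if include_lower_ranks then
            -- changed = dict.fromkeys(by_rank[:index+1], True)  (rank ∈ by_rank here, so index? is some)
            (PySem.List.slice by_rank none
                (some ((PySem.List.index? by_rank rank).getD 0 + 1))).foldl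
              (fun acc k => acc.insert k true) PySem.Dict.empty
          else (PySem.Dict.empty).insert rank true
        rs.update changed.items)
      rights)
  -- return dict(d, **rights)
  (d.update rights.items).items

-- ===== PORT B =====
def interpret_auth_id_py_alt (id : Option String) : List (String × Bool) :=
  let s : String := (id.getD "")
  let specs : List String := (PySem.Str.split? (PySem.Str.lower s) "_").getD []
  let by_rank := ["info", "trade", "withdraw"]
  -- max_idx = max((i for i, r in enumerate(by_rank) if r in specs), default=-1)
  let maxIdx : Int :=
    PySem.List.maxD
      (((PySem.List.enumerate by_rank).filter (fun p => specs.contains p.2)).map (·.1))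
      (fun x => x) (-1)
  -- {'active': ..., 'test': ..., **{r: i <= max_idx or r + '-' in specs ...}}
  ("active", !(specs.contains "disabled" || specs.contains "inactive")) ::
    ("test", specs.contains "test") ::
      (PySem.List.enumerate by_rank).map
        (fun p => (p.2, decide (p.1 ≤ maxIdx) || specs.contains (p.2 ++ "-")))

-- ===== PRECONDITION & SPEC =====
def Spec_interpret_auth_id_py (id : Option String) (out : List (String × Bool)) : Prop := out = interpret_auth_id_py_alt id
instance (id : Option String) (out : List (String × Bool)) : Decidable (Spec_interpret_auth_id_py id out) := by unfold Spec_interpret_auth_id_py; infer_instance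

-- ===== CLAIM (what is proved, stated in full; the proofs are below) =====
def Claim_equal_interpret_auth_id_py : Prop := ∀ (id : Option String), Dom_interpret_auth_id_py id → Spec_interpret_auth_id_py id (interpret_auth_id_py id)

-- ===== LEMMAS AND PROOFS =====

-- A's body from `specs` on, with membership in specs abstracted to `mem`
def pvAcore (mem : String → Bool) : List (String × Bool) :=
  let by_rank := ["info", "trade", "withdraw"]
  let d : PySem.Dict String Bool :=
    ((PySem.Dict.empty).insert "active"
        (!(["disabled", "inactive"].any (fun x => mem x)))).insert "test" (mem "test")
  let rights : PySem.Dict String Bool :=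
    by_rank.foldl (fun acc k => acc.insert k false) PySem.Dict.empty
  let rights :=
    (((["info", "trade", "withdraw", "info-", "trade-", "withdraw-"]).filter
        (fun x => mem x)).foldl
      (fun rs rank =>
        let include_lower_ranks := ¬ PySem.Str.endswith rank "-"
        let rank := if include_lower_ranks then rank else PySem.Str.slice rank none (some (-1))
        let changed : PySem.Dict String Bool :=
          if include_lower_ranks then
            (PySem.List.slice by_rank none
                (some ((PySem.List.index? by_rank rank).getD 0 + 1))).foldl
              (fun acc k => acc.insert k true) PySem.Dict.empty
          else (PySem.Dict.empty).insert rank true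
        rs.update changed.items)
      rights)
  (d.update rights.items).items

-- B's body from `specs` on, same abstraction
def pvBcore (mem : String → Bool) : List (String × Bool) :=
  let by_rank := ["info", "trade", "withdraw"]
  let maxIdx : Int :=
    PySem.List.maxD
      (((PySem.List.enumerate by_rank).filter (fun p => mem p.2)).map (·.1))
      (fun x => x) (-1)
  ("active", !(mem "disabled" || mem "inactive")) ::
    ("test", mem "test") ::
      (PySem.List.enumerate by_rank).map
        (fun p => (p.2, decide (p.1 ≤ maxIdx) || mem (p.2 ++ "-")))

-- the membership function determined by the nine strings either core ever tests
def pvPick (b1 b2 b3 b4 b5 b6 b7 b8 b9 : Bool) : String → Bool := fun x =>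
  if x == "disabled" then b1 else if x == "inactive" then b2 else if x == "test" then b3
  else if x == "info" then b4 else if x == "trade" then b5 else if x == "withdraw" then b6
  else if x == "info-" then b7 else if x == "trade-" then b8 else if x == "withdraw-" then b9
  else false

theorem pvKey : ∀ b1 b2 b3 b4 b5 b6 b7 b8 b9 : Bool,
    pvAcore (pvPick b1 b2 b3 b4 b5 b6 b7 b8 b9) = pvBcore (pvPick b1 b2 b3 b4 b5 b6 b7 b8 b9) := by
  decide

theorem pvCore_eq (specs : List String) :
    pvAcore (fun x => specs.contains x) = pvBcore (fun x => specs.contains x) := by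
  calc pvAcore (fun x => specs.contains x)
      = pvAcore (pvPick (specs.contains "disabled") (specs.contains "inactive")
          (specs.contains "test") (specs.contains "info") (specs.contains "trade")
          (specs.contains "withdraw") (specs.contains "info-") (specs.contains "trade-")
          (specs.contains "withdraw-")) := rfl
    _ = pvBcore (pvPick (specs.contains "disabled") (specs.contains "inactive")
          (specs.contains "test") (specs.contains "info") (specs.contains "trade")
          (specs.contains "withdraw") (specs.contains "info-") (specs.contains "trade-")
          (specs.contains "withdraw-")) :=
        pvKey _ _ _ _ _ _ _ _ _
    _ = pvBcore (fun x => specs.contains x) := rfl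

-- ===== VERDICT (by name: the statement is the Claim_ definition above) =====
theorem interpret_auth_id_py_spec : Claim_equal_interpret_auth_id_py := by
  intro id _
  show interpret_auth_id_py id = interpret_auth_id_py_alt id
  cases id with
  | none =>
      exact pvCore_eq ((PySem.Str.split? (PySem.Str.lower "") "_").getD [])
  | some s =>
      exact pvCore_eq ((PySem.Str.split? (PySem.Str.lower s) "_").getD [])
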